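-- pv_equiv track=rewrite | github.com/djaychela/advent_of_code | 2022/17_02.py | scan_play_field_top_2
-- ===== SOURCE A (Python) =====
-- play_field = dict()
--
-- def scan_play_field_top_2(play_field):
--     values = list(play_field.keys())
--     # add top 25 rows for each column
--     rows_to_scan = 25
--     top_line = []
--     norm_y = max(y for x,y in values)
--
--     for idx in range(0, 7):
--         sum_y = sum(y-norm_y for x,y in values if x == idx and y-norm_y <= rows_to_scan)
--         top_line.append(sum_y)
--     return top_line
-- ===== SOURCE B (Python) =====
-- def scan_play_field_top_2(play_field):
--     keys = list(play_field.keys())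
--     norm_y = None
--     for x, y in keys:
--         if norm_y is None or y > norm_y:
--             norm_y = y
--     if norm_y is None:
--         raise ValueError("max() arg is an empty sequence")
--     sums = {}
--     for x, y in keys:
--         if y - norm_y <= 25:
--             sums[x] = sums.get(x, 0) + (y - norm_y)
--     return [sums.get(i, 0) for i in range(7)]
-- ===== Notes on version B (the rewrite author's own statement) =====
-- stated objective: alternative
-- what changed: Replaces A's seven per-column filtered scans with a hand-rolled running-max pass followed by one grouping pass into a dict keyed by column, then a final read-out of columns 0..6; A's inner per-column scans disappear.
import Mathlib
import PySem

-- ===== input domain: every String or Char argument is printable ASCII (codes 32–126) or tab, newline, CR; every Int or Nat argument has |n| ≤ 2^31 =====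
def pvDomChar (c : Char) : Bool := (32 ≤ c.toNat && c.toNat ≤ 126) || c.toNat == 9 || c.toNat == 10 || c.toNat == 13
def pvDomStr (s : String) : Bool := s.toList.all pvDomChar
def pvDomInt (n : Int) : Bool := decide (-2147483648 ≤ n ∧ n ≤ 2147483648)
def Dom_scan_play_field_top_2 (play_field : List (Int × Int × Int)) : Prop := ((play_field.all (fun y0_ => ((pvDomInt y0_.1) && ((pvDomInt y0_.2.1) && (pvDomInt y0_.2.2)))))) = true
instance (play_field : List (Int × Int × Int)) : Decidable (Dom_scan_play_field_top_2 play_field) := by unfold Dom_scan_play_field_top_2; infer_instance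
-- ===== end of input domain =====

-- B replaces A's seven per-column filtered scans with a hand-rolled running-max
-- pass, one grouping pass into a dict keyed by column, and a read-out of columns
-- 0..6 (alternative decomposition, same result on non-empty input).


-- ===== PORT A =====
-- play_field is a dict keyed by (x, y); its items arrive as flattened triples
-- (x, y, v).  list(play_field.keys()) = the distinct (x, y) keys in
-- first-occurrence order = PySem.List.dedup of the mapped pairs.
def scan_play_field_top_2 (play_field : List (Int × Int × Int)) : List Int :=
  let values : List (Int × Int) := PySem.List.dedup (play_field.map (fun t => (t.1, t.2.1)))
  let rows_to_scan : Int := 25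
  match PySem.List.max? (values.map (fun p => p.2)) (fun y => y) with
  | none => []  -- max() over an empty sequence raises ValueError; excluded by Pre_
  | some norm_y =>
    (PySem.List.pyRange 0 7 1).foldl
      (fun top_line idx =>
        top_line ++ [((values.filter
            (fun p => p.1 == idx && decide (p.2 - norm_y ≤ rows_to_scan))).map
            (fun p => p.2 - norm_y)).sum])
      []

-- ===== PORT B =====
def scan_play_field_top_2_alt (play_field : List (Int × Int × Int)) : List Int :=
  let keys : List (Int × Int) := PySem.List.dedup (play_field.map (fun t => (t.1, t.2.1)))
  let norm : Option Int := keys.foldl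
    (fun acc p => match acc with
      | none => some p.2
      | some m => some (if p.2 > m then p.2 else m))
    none
  match norm with
  | none => []  -- python B raises ValueError here (empty input); excluded by Pre_
  | some norm_y =>
    let sums : PySem.Dict Int Int := keys.foldl
      (fun d p =>
        if p.2 - norm_y ≤ 25 then d.insert p.1 (d.getD p.1 0 + (p.2 - norm_y)) else d)
      PySem.Dict.empty
    (PySem.List.pyRange 0 7 1).map (fun i => sums.getD i 0)

-- ===== PRECONDITION & SPEC =====
-- A raises ValueError (max of an empty sequence) on the empty dict; Pre_ excludes it.
def Pre_scan_play_field_top_2 (play_field : List (Int × Int × Int)) : Prop := play_field ≠ []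
instance (play_field : List (Int × Int × Int)) : Decidable (Pre_scan_play_field_top_2 play_field) := by unfold Pre_scan_play_field_top_2; infer_instance

def pvWitness_scan_play_field_top_2 : (List (Int × Int × Int)) := [(0, 3, 1), (2, 5, 1)]

def Spec_scan_play_field_top_2 (play_field : List (Int × Int × Int)) (out : List Int) : Prop := out = scan_play_field_top_2_alt play_field
instance (play_field : List (Int × Int × Int)) (out : List Int) : Decidable (Spec_scan_play_field_top_2 play_field out) := by unfold Spec_scan_play_field_top_2; infer_instance

-- ===== CLAIM (what is proved, stated in full; the proofs are below) =====
def Claim_equal_scan_play_field_top_2 : Prop := ∀ (play_field : List (Int × Int × Int)), Dom_scan_play_field_top_2 play_field → Pre_scan_play_field_top_2 play_field → Spec_scan_play_field_top_2 play_field (scan_play_field_top_2 play_field)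

-- ===== LEMMAS AND PROOFS =====

-- Sum A computes for one column: Σ (y - n) over keys in column i within 25 of the top.
def colSum (n : Int) (i : Int) (ks : List (Int × Int)) : Int :=
  ((ks.filter (fun p => p.1 == i && decide (p.2 - n ≤ 25))).map (fun p => p.2 - n)).sum

-- B's running-max loop over the already-seen part is foldl max, i.e. Python's max().
theorem normLoop_some (ks : List (Int × Int)) (m : Int) :
    ks.foldl
      (fun acc p => match acc with
        | none => some p.2
        | some m => some (if p.2 > m then p.2 else m))
      (some m) = some ((ks.map (fun p => p.2)).foldl max m) := by
  induction ks generalizing m with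
  | nil => simp
  | cons p t ih =>
    simp only [List.foldl_cons, List.map_cons, ih]
    congr 2
    rw [max_def]; split_ifs <;> omega

theorem normLoop_eq_max? (ks : List (Int × Int)) :
    ks.foldl
      (fun acc p => match acc with
        | none => some p.2
        | some m => some (if p.2 > m then p.2 else m))
      none = PySem.List.max? (ks.map (fun p => p.2)) (fun y => y) := by
  cases ks with
  | nil => simp [PySem.List.max?]
  | cons p t =>
    simp only [List.foldl_cons, List.map_cons, PySem.List.max?_id_cons]
    exact normLoop_some t p.2

-- B's grouping pass into the dict: each lookup is the starting value plus A's column sum.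
theorem sumsLoop_getD (n : Int) (ks : List (Int × Int)) :
    ∀ (d : PySem.Dict Int Int) (i : Int),
      (ks.foldl
        (fun d p =>
          if p.2 - n ≤ 25 then d.insert p.1 (d.getD p.1 0 + (p.2 - n)) else d)
        d).getD i 0 = d.getD i 0 + colSum n i ks := by
  induction ks with
  | nil => intro d i; simp [colSum]
  | cons p t ih =>
    intro d i
    obtain ⟨x, y⟩ := p
    by_cases hy : y - n ≤ 25
    · simp only [List.foldl_cons, if_pos hy]
      rw [ih]
      rw [PySem.Dict.getD_insert]
      have hy' : y ≤ 25 + n := by omega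
      by_cases hix : i = x
      · subst hix
        simp [colSum, hy', add_assoc]
      · simp [colSum, hy', hix, Ne.symm hix]
    · simp only [List.foldl_cons, if_neg hy]
      rw [ih]
      have hy' : ¬ y ≤ 25 + n := by omega
      simp [colSum, hy']

theorem foldA_eq (n : Int) (ks : List (Int × Int)) :
    (PySem.List.pyRange 0 7 1).foldl
      (fun top_line idx =>
        top_line ++ [((ks.filter
            (fun p => p.1 == idx && decide (p.2 - n ≤ 25))).map
            (fun p => p.2 - n)).sum])
      [] =
    [colSum n 0 ks, colSum n 1 ks, colSum n 2 ks, colSum n 3 ks,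
     colSum n 4 ks, colSum n 5 ks, colSum n 6 ks] := by
  rw [show PySem.List.pyRange 0 7 1 = [0, 1, 2, 3, 4, 5, 6] from by decide]
  simp [colSum, List.foldl_cons]

-- ===== VERDICT (by name: the statement is the Claim_ definition above) =====
theorem scan_play_field_top_2_spec : Claim_equal_scan_play_field_top_2 := by
  intro pf _ _
  unfold Spec_scan_play_field_top_2 scan_play_field_top_2 scan_play_field_top_2_alt
  simp only [normLoop_eq_max?]
  cases hm : PySem.List.max?
      ((PySem.List.dedup (pf.map (fun t => (t.1, t.2.1)))).map (fun p => p.2))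
      (fun y => y) with
  | none => simp only [hm]
  | some n =>
    simp only [hm]
    rw [foldA_eq,
      show PySem.List.pyRange 0 7 1 = [0, 1, 2, 3, 4, 5, 6] from by decide]
    simp only [List.map_cons, List.map_nil, sumsLoop_getD, PySem.Dict.getD_empty, zero_add]
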